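-- pv_equiv track=rewrite | github.com/felipechang/peru-elecciones-2026 | generator/listado_parser.py | _merge_residentes_exterior
-- ===== SOURCE A (Python) =====
-- import unicodedata
--
-- def _fold(s: str) -> str:
--     s = unicodedata.normalize("NFD", s)
--     s = "".join(c for c in s if unicodedata.category(c) != "Mn")
--     return s.casefold()
--
-- def _merge_residentes_exterior(lines: list[str]) -> list[str]:
--     """Fix ``RESIDENTES EN EL`` / ``EXTRANJERO`` split across lines."""
--     out: list[str] = []
--     i = 0
--     while i < len(lines):
--         line = lines[i]
--         if line == "EXTRANJERO" and out:
--             prev = out[-1]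
--             if _fold(prev).rstrip().endswith(_fold("RESIDENTES EN EL")):
--                 out[-1] = prev + " EXTRANJERO"
--                 i += 1
--                 continue
--         out.append(line)
--         i += 1
--     return out
-- ===== SOURCE B (Python) =====
-- import unicodedata
--
--
-- def _fold(s: str) -> str:
--     s = unicodedata.normalize("NFD", s)
--     s = "".join(c for c in s if unicodedata.category(c) != "Mn")
--     return s.casefold()
--
--
-- _SUFFIX = _fold("RESIDENTES EN EL")
--
--
-- def _merge_residentes_exterior(lines: list[str]) -> list[str]:
--     """Fix ``RESIDENTES EN EL`` / ``EXTRANJERO`` split across lines.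
--
--     Forward look-ahead over the input: a line ending (after folding) in
--     "RESIDENTES EN EL" absorbs a following "EXTRANJERO" line; no reference
--     to the output tail is needed.
--     """
--     out: list[str] = []
--     i = 0
--     n = len(lines)
--     while i < n:
--         if i + 1 < n and lines[i + 1] == "EXTRANJERO" and _fold(lines[i]).rstrip().endswith(_SUFFIX):
--             out.append(lines[i] + " EXTRANJERO")
--             i += 2
--         else:
--             out.append(lines[i])
--             i += 1
--     return out
-- ===== Notes on version B (the rewrite author's own statement) =====
-- stated objective: alternative
-- what changed: Replaced A's back-merge that inspects and rewrites the last element of the output list with a forward look-ahead pass over the input that decides from lines[i] and lines[i+1] alone and consumes two input lines on a merge, never touching the output tail.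
import Mathlib
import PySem

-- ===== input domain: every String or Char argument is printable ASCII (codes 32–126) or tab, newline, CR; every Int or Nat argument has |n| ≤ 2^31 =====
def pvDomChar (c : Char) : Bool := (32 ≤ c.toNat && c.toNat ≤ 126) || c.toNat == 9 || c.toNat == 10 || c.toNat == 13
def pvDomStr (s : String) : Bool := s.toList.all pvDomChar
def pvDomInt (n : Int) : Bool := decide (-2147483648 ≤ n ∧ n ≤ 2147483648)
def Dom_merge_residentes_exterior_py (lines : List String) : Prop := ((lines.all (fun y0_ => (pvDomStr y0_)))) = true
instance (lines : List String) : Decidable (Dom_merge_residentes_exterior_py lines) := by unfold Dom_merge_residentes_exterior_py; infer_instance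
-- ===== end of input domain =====

-- B re-decomposes A's back-merge on the output tail as a forward look-ahead over the input; same values, no speed claim.

-- ===== PORT A =====
-- _fold: on the printable-ASCII domain, NFD normalisation is the identity, no combining
-- marks ('Mn') occur, and casefold coincides with lower — so the fold is exactly lower there.
def foldPy (s : String) : String := PySem.Str.lower s

-- the test `_fold(prev).rstrip().endswith(_fold("RESIDENTES EN EL"))`
def endsResid (prev : String) : Bool :=
  PySem.Str.endswith (PySem.Str.rstrip (foldPy prev)) (foldPy "RESIDENTES EN EL")

-- A's while-loop: out grows at the back; `out[-1] = prev + " EXTRANJERO"` is dropLast ++ [...]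
def mergeLoopA : List String → List String → List String
  | out, [] => out
  | out, line :: rest =>
    if line = "EXTRANJERO" then
      match out.getLast? with          -- `and out:` / `prev = out[-1]`
      | some prev =>
        if endsResid prev = true then
          mergeLoopA (out.dropLast ++ [prev ++ " EXTRANJERO"]) rest
        else
          mergeLoopA (out ++ [line]) rest
      | none => mergeLoopA (out ++ [line]) rest
    else
      mergeLoopA (out ++ [line]) rest

def merge_residentes_exterior_py (lines : List String) : List String :=
  mergeLoopA [] lines

-- ===== PORT B =====
-- forward look-ahead: at the current line, if the NEXT line is "EXTRANJERO" and the current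
-- one (folded, rstripped) ends with "RESIDENTES EN EL", emit the merged line and skip the next.
def mergeLoopB : List String → List String
  | [] => []
  | [x] => [x]
  | x :: y :: rest =>
    if y = "EXTRANJERO" ∧ endsResid x = true then
      (x ++ " EXTRANJERO") :: mergeLoopB rest
    else
      x :: mergeLoopB (y :: rest)

def merge_residentes_exterior_py_alt (lines : List String) : List String :=
  mergeLoopB lines

-- ===== PRECONDITION & SPEC =====
def Spec_merge_residentes_exterior_py (lines : List String) (out : List String) : Prop := out = merge_residentes_exterior_py_alt lines
instance (lines : List String) (out : List String) : Decidable (Spec_merge_residentes_exterior_py lines out) := by unfold Spec_merge_residentes_exterior_py; infer_instance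

-- ===== CLAIM (what is proved, stated in full; the proofs are below) =====
def Claim_equal_merge_residentes_exterior_py : Prop := ∀ (lines : List String), Dom_merge_residentes_exterior_py lines → Spec_merge_residentes_exterior_py lines (merge_residentes_exterior_py lines)

-- ===== LEMMAS AND PROOFS =====

-- rstrip is the identity on anything ending in the (lowered) " EXTRANJERO" block
theorem rstrip_ext (u : List Char) :
    PySem.Chars.rstrip (u ++ PySem.Chars.lower (" EXTRANJERO".toList)) =
      u ++ PySem.Chars.lower (" EXTRANJERO".toList) := by
  unfold PySem.Chars.rstrip
  rw [List.reverse_append, List.dropWhile_append]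
  have h1 : List.dropWhile PySem.Chars.isspace (PySem.Chars.lower (" EXTRANJERO".toList)).reverse
      = (PySem.Chars.lower (" EXTRANJERO".toList)).reverse := by decide
  rw [h1]
  simp
  intro hc
  exact absurd hc (by decide)

-- a line already merged with " EXTRANJERO" can never trigger another merge
theorem notResid (M : String) : endsResid (M ++ " EXTRANJERO") = false := by
  apply Bool.eq_false_iff.mpr
  intro h
  unfold endsResid foldPy at h
  rw [PySem.Str.endswith_eq, PySem.Chars.endswith_iff] at h
  simp only [PySem.Str.toList_rstrip, PySem.Str.toList_lower, String.toList_append] at h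
  have hmap : PySem.Chars.lower (M.toList ++ " EXTRANJERO".toList) =
      PySem.Chars.lower M.toList ++ PySem.Chars.lower (" EXTRANJERO".toList) := by
    simp [PySem.Chars.lower]
  rw [hmap, rstrip_ext] at h
  have h2 : PySem.Chars.lower (" EXTRANJERO".toList) <:+
      PySem.Chars.lower M.toList ++ PySem.Chars.lower (" EXTRANJERO".toList) :=
    List.suffix_append _ _
  have h3 : PySem.Chars.lower (" EXTRANJERO".toList) <:+
      PySem.Chars.lower ("RESIDENTES EN EL".toList) := by
    apply List.suffix_of_suffix_length_le h2 h
    decide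
  exact absurd h3 (by decide)

theorem mergeB_cons_of_not {M : String} (h : endsResid M = false) (r : List String) :
    mergeLoopB (M :: r) = M :: mergeLoopB r := by
  cases r with
  | nil => rfl
  | cons z r' => simp [mergeLoopB, h]

theorem mergeLoop_eq (rest : List String) : ∀ (acc : List String) (L : String),
    mergeLoopA (acc ++ [L]) rest = acc ++ mergeLoopB (L :: rest) := by
  induction rest with
  | nil => intro acc L; simp [mergeLoopA, mergeLoopB]
  | cons y r ih =>
    intro acc L
    by_cases hy : y = "EXTRANJERO"
    · by_cases hL : endsResid L = true
      · have : mergeLoopA (acc ++ [L]) (y :: r)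
            = mergeLoopA (acc ++ [L ++ " EXTRANJERO"]) r := by
          simp [mergeLoopA, hy, hL]
        rw [this, ih, mergeB_cons_of_not (notResid L)]
        simp [mergeLoopB, hy, hL]
      · have : mergeLoopA (acc ++ [L]) (y :: r)
            = mergeLoopA ((acc ++ [L]) ++ [y]) r := by
          simp [mergeLoopA, hy, hL]
        rw [this, ih]
        simp [mergeLoopB, hy, hL]
    · have : mergeLoopA (acc ++ [L]) (y :: r)
          = mergeLoopA ((acc ++ [L]) ++ [y]) r := by
        simp [mergeLoopA, hy]
      rw [this, ih]
      simp [mergeLoopB, hy]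

-- ===== VERDICT (by name: the statement is the Claim_ definition above) =====
theorem merge_residentes_exterior_py_spec : Claim_equal_merge_residentes_exterior_py := by
  intro lines _
  unfold Spec_merge_residentes_exterior_py merge_residentes_exterior_py merge_residentes_exterior_py_alt
  cases lines with
  | nil => rfl
  | cons x rest =>
    have hstep : mergeLoopA [] (x :: rest) = mergeLoopA ([] ++ [x]) rest := by
      by_cases hx : x = "EXTRANJERO" <;> simp [mergeLoopA, hx]
    rw [hstep, mergeLoop_eq]
    rfl
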